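-- pv_equiv track=rewrite | github.com/zjl233/pyLeetCode | extra/longest_ased_subsequence.py | longest_sqeu_after_delete_num
-- ===== SOURCE A (Python) =====
-- from typing import List
--
-- def longest_sqeu(nums: List[int]) -> int:
--     # 洗数据
--     if not nums:
--         return 0
--     if len(nums) == 1:
--         return 1
--
--     cur, max_ = 1, 1
--     for i in range(1, len(nums)):
--         if nums[i - 1] < nums[i]:
--             cur += 1
--             max_ = max(max_, cur)
--         else:
--             cur = 1
--
--     return max_
--
-- def longest_sqeu_after_delete_num(nums: List[int]) -> int:
--     # 洗数据
--     if not nums: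
--         return 0
--     if len(nums) == 1:
--         return 1
--
--     # 蠢办法，数组上的每个数都尝试删除一次，看看能不能产生更长的递增序列
--     max_ = 0
--     for i in range(len(nums)):
--         max_ = max(max_, longest_sqeu(nums[:i] + nums[i + 1:]))
--
--         # 注意加1
--     return max_ + 1
-- ===== SOURCE B (Python) =====
-- from typing import List
--
-- def longest_sqeu_after_delete_num(nums: List[int]) -> int:
--     n = len(nums)
--     if n == 0:
--         return 0
--     if n == 1:
--         return 1
--     # left[i] = length of the strictly increasing run ending at i
--     left = [1]
--     for i in range(1, n):
--         left.append(left[-1] + 1 if nums[i - 1] < nums[i] else 1)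
--     # right[i] = length of the strictly increasing run starting at i:
--     # the same scan over the reversed list, then flipped back
--     rev = nums[::-1]
--     rscan = [1]
--     for i in range(1, n):
--         rscan.append(rscan[-1] + 1 if rev[i] < rev[i - 1] else 1)
--     right = rscan[::-1]
--     longest = max(left)
--     # best run obtainable by deleting one element but not merging two runs
--     best = longest - 1 if longest == n else longest
--     # deleting nums[i] may merge the runs around it
--     for i in range(1, n - 1):
--         if nums[i - 1] < nums[i + 1]:
--             best = max(best, left[i - 1] + right[i + 1])
--     return best + 1
-- ===== Notes on version B (the rewrite author's own statement) =====
-- stated objective: faster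
-- what changed: A deletes each index in turn and rescans the whole remaining list (O(n^2)); B precomputes run lengths ending/starting at every index in two linear scans and gets each deletion's best as either the global best run (minus one when the whole list is increasing) or a merge left[i-1]+right[i+1] where nums[i-1]<nums[i+1], in O(n).
import Mathlib
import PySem

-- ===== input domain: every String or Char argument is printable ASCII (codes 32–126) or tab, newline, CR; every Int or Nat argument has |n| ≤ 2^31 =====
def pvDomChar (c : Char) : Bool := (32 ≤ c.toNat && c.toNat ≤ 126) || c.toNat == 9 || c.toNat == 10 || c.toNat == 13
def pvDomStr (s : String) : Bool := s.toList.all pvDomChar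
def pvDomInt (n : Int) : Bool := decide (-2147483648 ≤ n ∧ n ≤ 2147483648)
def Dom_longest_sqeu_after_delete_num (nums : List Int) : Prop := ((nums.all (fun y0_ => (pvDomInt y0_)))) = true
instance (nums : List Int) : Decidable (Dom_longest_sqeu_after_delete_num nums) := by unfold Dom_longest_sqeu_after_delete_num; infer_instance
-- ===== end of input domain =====

-- B replaces A's delete-and-rescan O(n^2) search by two linear run-length scans plus a
-- linear merge pass (asymptotically faster); return values proved equal on all int lists.


-- ===== PORT A =====
-- helper longest_sqeu: longest strictly increasing contiguous run, by one scan
def pyLongestSqeu (nums : List Int) : Int :=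
  if nums = [] then 0
  else if nums.length = 1 then 1
  else
    ((PySem.List.pyRange 1 nums.length 1).foldl
      (fun (p : Int × Int) i =>
        if PySem.List.pyGetD nums (i - 1) 0 < PySem.List.pyGetD nums i 0 then
          (p.1 + 1, max p.2 (p.1 + 1))
        else (1, p.2))
      (1, 1)).2

def longest_sqeu_after_delete_num (nums : List Int) : Int :=
  if nums = [] then 0
  else if nums.length = 1 then 1
  else
    ((PySem.List.pyRange 0 nums.length 1).foldl
      (fun m i =>
        max m (pyLongestSqeu
          (PySem.List.slice nums none (some i) ++ PySem.List.slice nums (some (i + 1)) none)))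
      0) + 1

-- ===== PORT B =====
def longest_sqeu_after_delete_num_alt (nums : List Int) : Int :=
  let n : Int := nums.length
  if n = 0 then 0
  else if n = 1 then 1
  else
    -- left[i] = length of the strictly increasing run ending at i
    let left := (PySem.List.pyRange 1 n 1).foldl
      (fun acc i =>
        acc ++ [if PySem.List.pyGetD nums (i - 1) 0 < PySem.List.pyGetD nums i 0 then
                  PySem.List.pyGetD acc (-1) 0 + 1 else 1])
      [(1 : Int)]
    -- right[i] = run length starting at i: the same scan over the reversed list, flipped back
    let rev := (PySem.List.slice? nums none none (-1)).getD []   -- nums[::-1]; step -1 ≠ 0, never none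
    let rscan := (PySem.List.pyRange 1 n 1).foldl
      (fun acc i =>
        acc ++ [if PySem.List.pyGetD rev i 0 < PySem.List.pyGetD rev (i - 1) 0 then
                  PySem.List.pyGetD acc (-1) 0 + 1 else 1])
      [(1 : Int)]
    let right := (PySem.List.slice? rscan none none (-1)).getD []
    let longest := (PySem.List.max? left (fun y => y)).getD 0    -- left is nonempty: max() cannot raise
    let best : Int := if longest = n then longest - 1 else longest
    let best := (PySem.List.pyRange 1 (n - 1) 1).foldl
      (fun b i =>
        if PySem.List.pyGetD nums (i - 1) 0 < PySem.List.pyGetD nums (i + 1) 0 then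
          max b (PySem.List.pyGetD left (i - 1) 0 + PySem.List.pyGetD right (i + 1) 0)
        else b)
      best
    best + 1

-- ===== PRECONDITION & SPEC =====
def Spec_longest_sqeu_after_delete_num (nums : List Int) (out : Int) : Prop := out = longest_sqeu_after_delete_num_alt nums
instance (nums : List Int) (out : Int) : Decidable (Spec_longest_sqeu_after_delete_num nums out) := by unfold Spec_longest_sqeu_after_delete_num; infer_instance

-- ===== CLAIM (what is proved, stated in full; the proofs are below) =====
def Claim_equal_longest_sqeu_after_delete_num : Prop := ∀ (nums : List Int), Dom_longest_sqeu_after_delete_num nums → Spec_longest_sqeu_after_delete_num nums (longest_sqeu_after_delete_num nums)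

-- ===== LEMMAS AND PROOFS =====

-- ---------- spec-side run-length functions ----------

-- length of the longest r-chain prefix
def prefR (r : Int → Int → Prop) [DecidableRel r] : List Int → Nat
  | [] => 0
  | [_] => 1
  | a :: b :: t => if r a b then prefR r (b :: t) + 1 else 1

-- length of the longest r-chain suffix
def endR (r : Int → Int → Prop) [DecidableRel r] (l : List Int) : Nat :=
  prefR (fun a b => r b a) l.reverse

-- longest r-chain contiguous segment
def lspA (r : Int → Int → Prop) [DecidableRel r] : List Int → Nat
  | [] => 0
  | a :: t => max (prefR r (a :: t)) (lspA r t)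

def pref (l : List Int) : Nat := prefR (· < ·) l
def suf (l : List Int) : Nat := endR (· < ·) l
def lsp (l : List Int) : Nat := lspA (fun a b => b < a) l.reverse

-- A's value for length ≥ 2, in Nat: max over deletions of the longest run
def maxE (l : List Int) : Nat :=
  (List.range l.length).foldl (fun b i => max b (lsp (l.eraseIdx i))) 0

-- B's value for length ≥ 2, in Nat
def avoidN (l : List Int) : Nat := if lsp l = l.length then lsp l - 1 else lsp l

def XB (l : List Int) : Nat :=
  (List.range (l.length - 2)).foldl
    (fun b k =>
      if l.getD k 0 < l.getD (k + 2) 0 then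
        max b (suf (l.take (k + 1)) + pref (l.drop (k + 2)))
      else b)
    (avoidN l)

-- ---------- generic facts about prefR / endR / lspA ----------

theorem prefR_congr (r s : Int → Int → Prop) [DecidableRel r] [DecidableRel s]
    (h : ∀ a b, r a b ↔ s a b) (l : List Int) : prefR r l = prefR s l := by
  induction l with
  | nil => rfl
  | cons a t ih =>
    cases t with
    | nil => rfl
    | cons b t' =>
      simp only [prefR] at ih ⊢
      rw [ih]
      exact if_congr (h a b) rfl rfl

theorem prefR_pos (r : Int → Int → Prop) [DecidableRel r] (l : List Int) (h : l ≠ []) :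
    1 ≤ prefR r l := by
  match l with
  | [a] => simp [prefR]
  | a :: b :: t => simp only [prefR]; split <;> omega

theorem prefR_le_length (r : Int → Int → Prop) [DecidableRel r] (l : List Int) :
    prefR r l ≤ l.length := by
  induction l with
  | nil => simp [prefR]
  | cons a t ih =>
    cases t with
    | nil => simp [prefR]
    | cons b t' =>
      simp only [prefR, List.length_cons] at ih ⊢
      split <;> omega

theorem isChain_take_prefR (r : Int → Int → Prop) [DecidableRel r] (l : List Int) :
    List.IsChain r (l.take (prefR r l)) := by
  induction l with
  | nil => simp
  | cons a t ih =>
    cases t with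
    | nil => simp [prefR]
    | cons b t' =>
      simp only [prefR]
      by_cases hr : r a b
      · rw [if_pos hr, List.take_succ_cons]
        refine (ih).cons ?_
        intro y hy
        have h1 : 1 ≤ prefR r (b :: t') := prefR_pos r _ (by simp)
        rw [List.head?_take] at hy
        simp only [if_neg (by omega : ¬ prefR r (b :: t') = 0)] at hy
        simp only [List.head?_cons, Option.mem_def, Option.some.injEq] at hy
        subst hy; exact hr
      · rw [if_neg hr, List.take_succ_cons, List.take_zero]
        simp

theorem prefR_ge_of_prefix_chain (r : Int → Int → Prop) [DecidableRel r]
    {m l : List Int} (hp : m <+: l) (hc : List.IsChain r m) : m.length ≤ prefR r l := by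
  revert hp hc
  induction m generalizing l with
  | nil => intro _ _; simp
  | cons x m' ih =>
    intro hp hc
    cases l with
    | nil => simp at hp
    | cons a t =>
      obtain ⟨hxa, hm'⟩ := List.cons_prefix_cons.mp hp
      subst hxa
      cases m' with
      | nil => simpa using prefR_pos r (x :: t) (by simp)
      | cons y m'' =>
        cases t with
        | nil => simp at hm'
        | cons z t'' =>
          obtain ⟨hyz, hm''⟩ := List.cons_prefix_cons.mp hm'
          subst hyz
          obtain ⟨hxy, hcm⟩ := List.isChain_cons_cons.mp hc
          have hle := ih hm' hcm
          simp only [prefR, if_pos hxy]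
          simp only [List.length_cons] at hle ⊢
          omega

theorem lspA_le_length (r : Int → Int → Prop) [DecidableRel r] (l : List Int) :
    lspA r l ≤ l.length := by
  induction l with
  | nil => simp [lspA]
  | cons a t ih =>
    simp only [lspA, List.length_cons, max_le_iff]
    exact ⟨prefR_le_length r (a :: t), by omega⟩

theorem lspA_pos (r : Int → Int → Prop) [DecidableRel r] (l : List Int) (h : l ≠ []) :
    1 ≤ lspA r l := by
  match l with
  | a :: t =>
    simp only [lspA, le_max_iff]
    exact Or.inl (prefR_pos r _ (by simp))

theorem lspA_ge_of_infix_chain (r : Int → Int → Prop) [DecidableRel r]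
    {m l : List Int} (hp : m <:+: l) (hc : List.IsChain r m) : m.length ≤ lspA r l := by
  induction l generalizing m with
  | nil => have := List.infix_nil.mp hp; subst this; simp
  | cons a t ih =>
    rcases List.infix_cons_iff.mp hp with hpre | hinf
    · exact le_trans (prefR_ge_of_prefix_chain r hpre hc) (le_max_left _ _)
    · exact le_trans (ih hinf hc) (le_max_right _ _)

theorem lspA_witness (r : Int → Int → Prop) [DecidableRel r] (l : List Int) :
    ∃ s m t, l = s ++ m ++ t ∧ List.IsChain r m ∧ m.length = lspA r l ∧ (l ≠ [] → m ≠ []) := by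
  induction l with
  | nil => exact ⟨[], [], [], rfl, by simp, rfl, by simp⟩
  | cons a t ih =>
    by_cases hc : lspA r t ≤ prefR r (a :: t)
    · refine ⟨[], (a :: t).take (prefR r (a :: t)), (a :: t).drop (prefR r (a :: t)), ?_, ?_, ?_, ?_⟩
      · simp
      · exact isChain_take_prefR r (a :: t)
      · simp only [List.length_take, lspA]
        rw [Nat.max_eq_left hc]
        exact Nat.min_eq_left (prefR_le_length r (a :: t))
      · intro _ hnil
        have h1 : 1 ≤ prefR r (a :: t) := prefR_pos r _ (by simp)
        have hlen2 : ((a :: t).take (prefR r (a :: t))).length = prefR r (a :: t) := by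
          simp only [List.length_take]
          exact Nat.min_eq_left (prefR_le_length r (a :: t))
        rw [hnil] at hlen2
        simp only [List.length_nil] at hlen2
        omega
    · obtain ⟨s, m, t', heq, hch, hlen, hne⟩ := ih
      have hc' : prefR r (a :: t) < lspA r t := by omega
      have ht : t ≠ [] := by
        intro hteq
        subst hteq
        have h1 : 1 ≤ prefR r [a] := prefR_pos r _ (by simp)
        simp only [lspA] at hc'
        omega
      refine ⟨a :: s, m, t', by simp [heq], hch, ?_, fun _ => hne ht⟩
      simp only [lspA]
      rw [Nat.max_eq_right (le_of_lt hc')]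
      exact hlen

-- ---------- facts about pref / suf / lsp ----------

theorem pref_pos (l : List Int) (h : l ≠ []) : 1 ≤ pref l := prefR_pos _ l h

theorem pref_le_length (l : List Int) : pref l ≤ l.length := prefR_le_length _ l

theorem pref_ge_of_prefix_chain {m l : List Int} (hp : m <+: l)
    (hc : List.Chain' (· < ·) m) : m.length ≤ pref l :=
  prefR_ge_of_prefix_chain _ hp hc

theorem pref_witness (l : List Int) (h : l ≠ []) :
    ∃ m, m <+: l ∧ List.IsChain (· < ·) m ∧ m.length = pref l ∧ m.head? = l.head? := by
  refine ⟨l.take (pref l), List.take_prefix _ _, isChain_take_prefR _ l, ?_, ?_⟩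
  · simp only [List.length_take]
    exact Nat.min_eq_left (pref_le_length l)
  · rw [List.head?_take]
    have := pref_pos l h
    simp [Nat.pos_iff_ne_zero.mp this]

theorem suf_ge_of_suffix_chain {m l : List Int} (hp : m <:+ l)
    (hc : List.IsChain (· < ·) m) : m.length ≤ suf l := by
  have hp' : m.reverse <+: l.reverse := List.reverse_prefix.mpr hp
  have hc' : List.IsChain (fun a b : Int => b < a) m.reverse :=
    List.isChain_reverse.mpr hc
  have := prefR_ge_of_prefix_chain (fun a b : Int => b < a) hp' hc'
  simpa [suf, endR] using this

theorem suf_witness (l : List Int) (h : l ≠ []) :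
    ∃ m, m <:+ l ∧ List.IsChain (· < ·) m ∧ m.length = suf l ∧ m.getLast? = l.getLast? ∧ m ≠ [] := by
  set r' : Int → Int → Prop := fun a b => b < a with hr'
  set p := prefR r' l.reverse with hp
  have hrev : l.reverse ≠ [] := by simpa using h
  have hp1 : 1 ≤ p := prefR_pos r' l.reverse hrev
  have hple : p ≤ l.length := by
    have := prefR_le_length r' l.reverse; simpa using this
  have hsuf : suf l = p := rfl
  refine ⟨(l.reverse.take p).reverse, ?_, ?_, ?_, ?_, ?_⟩
  · have h1 : (l.reverse.take p) <+: l.reverse := List.take_prefix _ _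
    have := List.reverse_suffix.mpr h1
    simpa using this
  · exact List.isChain_reverse.mp (by simpa [hr'] using isChain_take_prefR r' l.reverse)
  · rw [hsuf]
    simp only [List.length_reverse, List.length_take, List.length_reverse]
    omega
  · rw [List.getLast?_reverse, List.head?_take]
    simp [Nat.pos_iff_ne_zero.mp hp1, List.head?_reverse]
  · intro hnil
    have := congrArg List.length hnil
    simp only [List.length_reverse, List.length_take, List.length_reverse, List.length_nil] at this
    omega

theorem lsp_le_length (l : List Int) : lsp l ≤ l.length := by
  have := lspA_le_length (fun a b : Int => b < a) l.reverse
  simpa [lsp] using this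

theorem lsp_pos (l : List Int) (h : l ≠ []) : 1 ≤ lsp l :=
  lspA_pos _ l.reverse (by simpa using h)

theorem lsp_ge_of_infix_chain {m l : List Int} (hp : m <:+: l)
    (hc : List.IsChain (· < ·) m) : m.length ≤ lsp l := by
  have hp' : m.reverse <:+: l.reverse := List.reverse_infix.mpr hp
  have hc' : List.IsChain (fun a b : Int => b < a) m.reverse :=
    List.isChain_reverse.mpr hc
  have := lspA_ge_of_infix_chain (fun a b : Int => b < a) hp' hc'
  simpa [lsp] using this

theorem lsp_witness (l : List Int) :
    ∃ s m t, l = s ++ m ++ t ∧ List.IsChain (· < ·) m ∧ m.length = lsp l ∧ (l ≠ [] → m ≠ []) := by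
  obtain ⟨s, m, t, heq, hch, hlen, hne⟩ := lspA_witness (fun a b : Int => b < a) l.reverse
  refine ⟨t.reverse, m.reverse, s.reverse, ?_, ?_, ?_, ?_⟩
  · have := congrArg List.reverse heq
    simpa [List.reverse_append, List.append_assoc] using this
  · exact List.isChain_reverse.mp (by
      simpa using hch)
  · simpa [lsp] using hlen
  · intro hl
    have : l.reverse ≠ [] := by simpa using hl
    simpa using hne this

theorem lsp_le_of_infix {u l : List Int} (h : u <:+: l) : lsp u ≤ lsp l := by
  obtain ⟨s, m, t, heq, hch, hlen, _⟩ := lsp_witness u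
  have hm : m <:+: u := ⟨s, t, by rw [heq]⟩
  calc lsp u = m.length := hlen.symm
    _ ≤ lsp l := lsp_ge_of_infix_chain (hm.trans h) hch

theorem isChain_of_lsp_eq_length {l : List Int} (h : lsp l = l.length) :
    List.IsChain (· < ·) l := by
  obtain ⟨s, m, t, heq, hch, hlen, _⟩ := lsp_witness l
  have hlength := congrArg List.length heq
  simp only [List.length_append] at hlength
  have hs : s = [] := by
    have := hlen.trans h
    rw [List.eq_nil_iff_length_eq_zero]
    omega
  have ht : t = [] := by
    have := hlen.trans h
    rw [List.eq_nil_iff_length_eq_zero]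
    omega
  subst hs ht
  simp only [List.nil_append, List.append_nil] at heq
  exact heq ▸ hch

-- ---------- append-one-element recurrences ----------

theorem endR_append_singleton (r : Int → Int → Prop) [DecidableRel r]
    (u : List Int) (x w : Int) (hw : u.getLast? = some w) :
    endR r (u ++ [x]) = if r w x then endR r u + 1 else 1 := by
  have hrev : u.reverse.head? = some w := by rw [List.head?_reverse]; exact hw
  obtain ⟨s, hs⟩ : ∃ s, u.reverse = w :: s := by
    cases hu : u.reverse with
    | nil => rw [hu] at hrev; simp at hrev
    | cons y s => rw [hu] at hrev; simp at hrev; exact ⟨s, by rw [hrev]⟩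
  simp only [endR, List.reverse_append, List.reverse_cons, List.reverse_nil,
    List.nil_append, List.singleton_append, hs, prefR]

theorem suf_append_singleton (u : List Int) (x w : Int) (hw : u.getLast? = some w) :
    suf (u ++ [x]) = if w < x then suf u + 1 else 1 :=
  endR_append_singleton _ u x w hw

theorem lsp_append_singleton (u : List Int) (x : Int) :
    lsp (u ++ [x]) = max (suf (u ++ [x])) (lsp u) := by
  simp only [lsp, suf, endR, List.reverse_append, List.reverse_cons, List.reverse_nil,
    List.nil_append, List.singleton_append, lspA]

-- ---------- the crossing decomposition ----------

theorem infix_append_split {m u v : List Int} (h : m <:+: u ++ v) :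
    m <:+: u ∨ m <:+: v ∨
      ∃ a b, m = a ++ b ∧ a ≠ [] ∧ b ≠ [] ∧ a <:+ u ∧ b <+: v := by
  obtain ⟨s, t, hst⟩ := h
  have hlen := congrArg List.length hst
  simp only [List.length_append] at hlen
  rcases (by omega : s.length + m.length ≤ u.length ∨ u.length < s.length + m.length) with h1 | h1
  · left
    have h0 : ((s ++ m) ++ t).take u.length = u := by rw [hst]; simp
    rw [List.take_append, List.take_of_length_le (by simp only [List.length_append]; omega)] at h0
    exact ⟨s, _, h0⟩
  · rcases (by omega : u.length ≤ s.length ∨ s.length < u.length) with h2 | h2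
    · right; left
      have h0 : ((s ++ m) ++ t).drop u.length = v := by rw [hst]; simp
      rw [List.drop_append, List.drop_append,
          (by omega : u.length - s.length = 0), List.drop_zero,
          (by simp only [List.length_append]; omega : u.length - (s ++ m).length = 0),
          List.drop_zero] at h0
      exact ⟨_, _, h0⟩
    · right; right
      refine ⟨m.take (u.length - s.length), m.drop (u.length - s.length),
        (List.take_append_drop _ _).symm, ?_, ?_, ?_, ?_⟩
      · intro hnil
        have := congrArg List.length hnil
        simp only [List.length_take, List.length_nil] at this
        omega
      · intro hnil
        have := congrArg List.length hnil
        simp only [List.length_drop, List.length_nil] at this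
        omega
      · refine ⟨s, ?_⟩
        have h0 : ((s ++ m) ++ t).take u.length = u := by rw [hst]; simp
        rw [List.take_append, (by simp only [List.length_append]; omega : u.length - (s ++ m).length = 0),
            List.take_zero, List.append_nil, List.take_append,
            List.take_of_length_le (by omega)] at h0
        exact h0
      · refine ⟨t, ?_⟩
        have h0 : ((s ++ m) ++ t).drop u.length = v := by rw [hst]; simp
        rw [List.drop_append, (by simp only [List.length_append]; omega : u.length - (s ++ m).length = 0),
            List.drop_zero, List.drop_append,
            List.drop_of_length_le (by omega)] at h0
        simpa using h0

-- ---------- fold-max helper lemmas ----------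

theorem foldl_maxif_ge_init {β : Type} (L : List β) (c : β → Prop) [DecidablePred c]
    (g : β → Nat) (b : Nat) :
    b ≤ L.foldl (fun b i => if c i then max b (g i) else b) b := by
  induction L generalizing b with
  | nil => simp
  | cons x L ih =>
    simp only [List.foldl_cons]
    split
    · exact le_trans (le_max_left _ _) (ih _)
    · exact ih _

theorem foldl_maxif_ge_elem {β : Type} (L : List β) (c : β → Prop) [DecidablePred c]
    (g : β → Nat) (b : Nat) {i : β} (hi : i ∈ L) (hc : c i) :
    g i ≤ L.foldl (fun b i => if c i then max b (g i) else b) b := by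
  induction L generalizing b with
  | nil => simp at hi
  | cons x L ih =>
    simp only [List.foldl_cons]
    rcases List.mem_cons.mp hi with rfl | hi'
    · rw [if_pos hc]
      exact le_trans (le_max_right _ _) (foldl_maxif_ge_init L c g _)
    · exact ih _ hi'

theorem foldl_maxif_le {β : Type} (L : List β) (c : β → Prop) [DecidablePred c]
    (g : β → Nat) (b B : Nat) (hb : b ≤ B) (h : ∀ i ∈ L, c i → g i ≤ B) :
    L.foldl (fun b i => if c i then max b (g i) else b) b ≤ B := by
  induction L generalizing b with
  | nil => simpa
  | cons x L ih =>
    simp only [List.foldl_cons]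
    by_cases hcx : c x
    · rw [if_pos hcx]
      exact ih _ (max_le hb (h x (List.mem_cons_self) hcx))
        (fun i hi hci => h i (List.mem_cons_of_mem _ hi) hci)
    · rw [if_neg hcx]
      exact ih _ hb (fun i hi hci => h i (List.mem_cons_of_mem _ hi) hci)

theorem foldl_max_ge_init {β : Type} (L : List β) (g : β → Nat) (b : Nat) :
    b ≤ L.foldl (fun b i => max b (g i)) b := by
  induction L generalizing b with
  | nil => simp
  | cons x L ih => exact le_trans (le_max_left _ _) (ih _)

theorem foldl_max_ge_elem {β : Type} (L : List β) (g : β → Nat) (b : Nat)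
    {i : β} (hi : i ∈ L) : g i ≤ L.foldl (fun b i => max b (g i)) b := by
  induction L generalizing b with
  | nil => simp at hi
  | cons x L ih =>
    simp only [List.foldl_cons]
    rcases List.mem_cons.mp hi with rfl | hi'
    · exact le_trans (le_max_right _ _) (foldl_max_ge_init L g _)
    · exact ih _ hi'

theorem foldl_max_le {β : Type} (L : List β) (g : β → Nat) (b B : Nat)
    (hb : b ≤ B) (h : ∀ i ∈ L, g i ≤ B) :
    L.foldl (fun b i => max b (g i)) b ≤ B := by
  induction L generalizing b with
  | nil => simpa
  | cons x L ih =>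
    exact ih _ (max_le hb (h x List.mem_cons_self))
      (fun i hi => h i (List.mem_cons_of_mem _ hi))

-- casts: Int-valued max folds are casts of Nat-valued ones
theorem foldl_max_cast {β : Type} (L : List β) (g : β → Nat) (b : Nat) :
    L.foldl (fun acc x => max acc ((g x : Nat) : Int)) (b : Int)
      = ((L.foldl (fun acc x => max acc (g x)) b : Nat) : Int) := by
  induction L generalizing b with
  | nil => simp
  | cons x L ih =>
    simp only [List.foldl_cons]
    rw [← Nat.cast_max, ih]

theorem foldl_maxif_cast {β : Type} (L : List β) (c : β → Prop) [DecidablePred c]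
    (g : β → Nat) (b : Nat) :
    L.foldl (fun acc x => if c x then max acc ((g x : Nat) : Int) else acc) (b : Int)
      = ((L.foldl (fun acc x => if c x then max acc (g x) else acc) b : Nat) : Int) := by
  induction L generalizing b with
  | nil => simp
  | cons x L ih =>
    simp only [List.foldl_cons]
    split
    · rw [← Nat.cast_max, ih]
    · exact ih b

-- ---------- glue facts ----------

theorem getLast?_take_getD {l : List Int} {k : Nat} (hk : k < l.length) :
    (l.take (k + 1)).getLast? = some (l.getD k 0) := by
  have hlen : (l.take (k + 1)).length = k + 1 := by
    simp only [List.length_take]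
    omega
  rw [List.getLast?_eq_getElem?, hlen, Nat.add_sub_cancel,
      List.getElem?_eq_getElem (by omega), List.getElem_take,
      List.getD_eq_getElem l 0 hk]

theorem head?_drop_getD {l : List Int} {j : Nat} (hj : j < l.length) :
    (l.drop j).head? = some (l.getD j 0) := by
  rw [List.head?_eq_getElem?, List.getElem?_drop, Nat.add_zero,
      List.getElem?_eq_getElem hj, List.getD_eq_getElem l 0 hj]

theorem suffix_append_prefix_infix {a u b v : List Int} (ha : a <:+ u) (hb : b <+: v) :
    a ++ b <:+: u ++ v := by
  obtain ⟨w, hw⟩ := ha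
  obtain ⟨z, hz⟩ := hb
  exact ⟨w, z, by rw [← hw, ← hz]; simp [List.append_assoc]⟩

theorem getLast?_of_suffix {a u : List Int} (ha : a <:+ u) (hne : a ≠ []) :
    a.getLast? = u.getLast? := by
  obtain ⟨w, hw⟩ := ha
  rw [← hw, List.getLast?_append_of_ne_nil _ hne]

theorem head?_of_prefix {b v : List Int} (hb : b <+: v) (hne : b ≠ []) :
    b.head? = v.head? := by
  obtain ⟨z, hz⟩ := hb
  rw [← hz, List.head?_append_of_ne_nil _ hne]

-- ---------- the core combinatorial theorem ----------

theorem avoid_le_XB (l : List Int) : avoidN l ≤ XB l := by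
  unfold XB
  exact foldl_maxif_ge_init _ _ _ _

theorem lsp_take_le_avoid (l : List Int) (h2 : 2 ≤ l.length) {j : Nat} (hj : j ≤ l.length - 1) :
    lsp (l.take j) ≤ avoidN l := by
  unfold avoidN
  split
  · have h1 := lsp_le_length (l.take j)
    simp only [List.length_take] at h1
    omega
  · exact lsp_le_of_infix (List.take_prefix j l).isInfix

theorem lsp_drop_le_avoid (l : List Int) (h2 : 2 ≤ l.length) {j : Nat} (hj : 1 ≤ j) :
    lsp (l.drop j) ≤ avoidN l := by
  unfold avoidN
  split
  · have h1 := lsp_le_length (l.drop j)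
    simp only [List.length_drop] at h1
    omega
  · exact lsp_le_of_infix (List.drop_suffix j l).isInfix

theorem per_delete_le (l : List Int) (h2 : 2 ≤ l.length) (i : Nat) (hi : i < l.length) :
    lsp (l.eraseIdx i) ≤ XB l := by
  obtain ⟨s, m, t, heq, hch, hlen, _⟩ := lsp_witness (l.eraseIdx i)
  rw [← hlen]
  have hm : m <:+: l.take i ++ l.drop (i + 1) := by
    rw [← List.eraseIdx_eq_take_drop_succ]
    exact ⟨s, t, heq.symm⟩
  rcases infix_append_split hm with hcase | hcase | ⟨a, b, hab, hane, hbne, hsa, hpb⟩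
  · calc m.length ≤ lsp (l.take i) := lsp_ge_of_infix_chain hcase hch
      _ ≤ avoidN l := lsp_take_le_avoid l h2 (by omega)
      _ ≤ XB l := avoid_le_XB l
  · calc m.length ≤ lsp (l.drop (i + 1)) := lsp_ge_of_infix_chain hcase hch
      _ ≤ avoidN l := lsp_drop_le_avoid l h2 (by omega)
      _ ≤ XB l := avoid_le_XB l
  · -- crossing: the deleted element merges the run ending at i-1 with the run starting at i+1
    have hu : l.take i ≠ [] := by
      intro h0
      obtain ⟨w, hw⟩ := hsa
      rw [h0] at hw
      exact hane (List.append_eq_nil_iff.mp hw).2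
    have hv : l.drop (i + 1) ≠ [] := by
      intro h0
      exact hbne (List.prefix_nil.mp (h0 ▸ hpb))
    have hi1 : 1 ≤ i := by
      by_contra h0
      have : i = 0 := by omega
      subst this
      simp at hu
    have hi2 : i + 1 < l.length := by
      by_contra h0
      exact hv (List.drop_of_length_le (by omega))
    -- k is the loop index of B's merge pass
    set k := i - 1 with hk
    have hik : i = k + 1 := by omega
    have hklt : k < l.length - 2 := by omega
    subst hab
    obtain ⟨hca, hcb, hlink⟩ := List.isChain_append.mp hch
    have hlasta : a.getLast? = some (l.getD k 0) := by
      rw [getLast?_of_suffix hsa hane, hik, getLast?_take_getD (by omega)]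
    have hheadb : b.head? = some (l.getD (k + 2) 0) := by
      rw [head?_of_prefix hpb hbne, (by omega : i + 1 = k + 2), head?_drop_getD (by omega)]
    have hcond : l.getD k 0 < l.getD (k + 2) 0 :=
      hlink _ (by rw [hlasta]; rfl) _ (by rw [hheadb]; rfl)
    have hasuf : a.length ≤ suf (l.take (k + 1)) := by
      rw [← hik]; exact suf_ge_of_suffix_chain hsa hca
    have hbpref : b.length ≤ pref (l.drop (k + 2)) := by
      rw [(by omega : k + 2 = i + 1)]; exact pref_ge_of_prefix_chain hpb hcb
    have hgk : a.length + b.length ≤ suf (l.take (k + 1)) + pref (l.drop (k + 2)) := by omega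
    calc (a ++ b).length = a.length + b.length := List.length_append
      _ ≤ suf (l.take (k + 1)) + pref (l.drop (k + 2)) := hgk
      _ ≤ XB l := by
          unfold XB
          exact foldl_maxif_ge_elem (List.range (l.length - 2))
            (fun k => l.getD k 0 < l.getD (k + 2) 0)
            (fun k => suf (l.take (k + 1)) + pref (l.drop (k + 2)))
            (avoidN l) (List.mem_range.mpr hklt) hcond

theorem lsp_erase_le_maxE (l : List Int) {i : Nat} (hi : i < l.length) :
    lsp (l.eraseIdx i) ≤ maxE l := by
  unfold maxE
  exact foldl_max_ge_elem (List.range l.length) (fun j => lsp (l.eraseIdx j)) 0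
    (List.mem_range.mpr hi)

theorem avoid_le_maxE (l : List Int) (h2 : 2 ≤ l.length) : avoidN l ≤ maxE l := by
  unfold avoidN
  split
  · -- the whole list is strictly increasing: deleting the head gives a run of length n-1
    rename_i hfull
    have hch : List.IsChain (· < ·) l := isChain_of_lsp_eq_length hfull
    have h0 : lsp (l.eraseIdx 0) = l.length - 1 := by
      rw [List.eraseIdx_eq_take_drop_succ, List.take_zero, List.nil_append,
          Nat.zero_add]
      have hle := lsp_le_length (l.drop 1)
      have hge : (l.drop 1).length ≤ lsp (l.drop 1) :=
        lsp_ge_of_infix_chain (List.infix_refl _) (hch.drop 1)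
      simp only [List.length_drop] at hle hge
      omega
    have := lsp_erase_le_maxE l (i := 0) (by omega)
    omega
  · -- lsp l < n: some longest run misses an index; delete an endpoint outside it
    rename_i hfull
    obtain ⟨s, m, t, heq, hch, hlen, hne⟩ := lsp_witness l
    have hlength := congrArg List.length heq
    simp only [List.length_append] at hlength
    have hltn : lsp l < l.length := lt_of_le_of_ne (lsp_le_length l) hfull
    by_cases hs : s = []
    · -- s empty forces t nonempty: delete the last index
      have ht : t ≠ [] := by
        intro h0
        subst hs h0
        simp only [List.nil_append, List.append_nil] at heq
        have hll : l.length = m.length := by rw [heq]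
        omega
      have ht1 : 1 ≤ t.length := List.length_pos_of_ne_nil ht
      have hinf : m <:+: l.eraseIdx (l.length - 1) := by
        rw [List.eraseIdx_eq_take_drop_succ,
            List.drop_of_length_le (by omega), List.append_nil, heq,
            List.take_append, List.take_of_length_le
              (by simp only [List.length_append]; omega)]
        exact ⟨s, _, rfl⟩
      have h1 : lsp l ≤ lsp (l.eraseIdx (l.length - 1)) := by
        rw [← hlen]; exact lsp_ge_of_infix_chain hinf hch
      have h3 := lsp_erase_le_maxE l (i := l.length - 1) (by omega)
      omega
    · -- s nonempty: delete index 0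
      have hinf : m <:+: l.eraseIdx 0 := by
        rw [List.eraseIdx_eq_take_drop_succ, List.take_zero, List.nil_append,
            Nat.zero_add, List.drop_one, heq, List.append_assoc, List.tail_append,
            if_neg (by simp only [List.isEmpty_iff]; exact hs)]
        exact ⟨s.tail, t, by rw [List.append_assoc]⟩
      have h1 : lsp l ≤ lsp (l.eraseIdx 0) := by
        rw [← hlen]; exact lsp_ge_of_infix_chain hinf hch
      have h3 := lsp_erase_le_maxE l (i := 0) (by omega)
      omega

theorem merge_le_maxE (l : List Int) (h2 : 2 ≤ l.length) (k : Nat) (hk : k < l.length - 2)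
    (hc : l.getD k 0 < l.getD (k + 2) 0) :
    suf (l.take (k + 1)) + pref (l.drop (k + 2)) ≤ maxE l := by
  have hu : l.take (k + 1) ≠ [] := by
    intro h0
    have := congrArg List.length h0
    simp only [List.length_take, List.length_nil] at this
    omega
  have hv : l.drop (k + 2) ≠ [] := by
    intro h0
    have := congrArg List.length h0
    simp only [List.length_drop, List.length_nil] at this
    omega
  obtain ⟨a, hsa, hca, halen, halast, hane⟩ := suf_witness (l.take (k + 1)) hu
  obtain ⟨b, hpb, hcb, hblen, hbhead⟩ := pref_witness (l.drop (k + 2)) hv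
  have hbne : b ≠ [] := by
    intro h0
    rw [h0] at hblen
    have := pref_pos (l.drop (k + 2)) hv
    simp at hblen
    omega
  have hch : List.IsChain (· < ·) (a ++ b) := by
    refine List.isChain_append.mpr ⟨hca, hcb, ?_⟩
    intro x hx y hy
    rw [halast, getLast?_take_getD (by omega)] at hx
    rw [hbhead, head?_drop_getD (by omega)] at hy
    simp only [Option.mem_def, Option.some.injEq] at hx hy
    subst hx hy
    exact hc
  have hinf : a ++ b <:+: l.eraseIdx (k + 1) := by
    rw [List.eraseIdx_eq_take_drop_succ]
    exact suffix_append_prefix_infix hsa hpb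
  have h1 : a.length + b.length ≤ lsp (l.eraseIdx (k + 1)) := by
    have := lsp_ge_of_infix_chain hinf hch
    simpa [List.length_append] using this
  have h3 := lsp_erase_le_maxE l (i := k + 1) (by omega)
  omega

theorem core_eq (l : List Int) (h2 : 2 ≤ l.length) : maxE l = XB l := by
  refine Nat.le_antisymm ?_ ?_
  · unfold maxE
    refine foldl_max_le _ _ _ _ (Nat.zero_le _) ?_
    intro i hi
    exact per_delete_le l h2 i (List.mem_range.mp hi)
  · unfold XB
    refine foldl_maxif_le _ _ _ _ _ (avoid_le_maxE l h2) ?_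
    intro k hk hc
    exact merge_le_maxE l h2 k (List.mem_range.mp hk) hc

-- ---------- port A evaluates to maxE ----------

theorem getLast?_getD_self {l : List Int} (h : l ≠ []) :
    l.getLast? = some (l.getD (l.length - 1) 0) := by
  have hlen : 1 ≤ l.length := List.length_pos_of_ne_nil h
  rw [List.getLast?_eq_getElem?, List.getElem?_eq_getElem (by omega),
      List.getD_eq_getElem l 0 (by omega)]

theorem A_fold (l : List Int) (hl : l ≠ []) :
    (PySem.List.pyRange 1 l.length 1).foldl
      (fun (p : Int × Int) i =>
        if PySem.List.pyGetD l (i - 1) 0 < PySem.List.pyGetD l i 0 then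
          (p.1 + 1, max p.2 (p.1 + 1))
        else (1, p.2))
      (1, 1)
    = ((suf l : Int), (lsp l : Int)) := by
  induction l using List.reverseRecOn with
  | nil => exact absurd rfl hl
  | append_singleton u x ih =>
    rcases eq_or_ne u [] with rfl | hu
    · simp only [List.nil_append]
      have h1 : PySem.List.pyRange 1 (([x] : List Int).length) 1 = [] := by
        rw [PySem.List.pyRange_one]
        simp
      rw [h1]
      simp [suf, endR, prefR, lsp, lspA]
    · have hn1 : 1 ≤ u.length := List.length_pos_of_ne_nil hu
      have hrange : PySem.List.pyRange 1 ((u ++ [x]).length) 1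
          = PySem.List.pyRange 1 (u.length) 1 ++ [(u.length : Int)] := by
        have : ((u ++ [x]).length : Int) = (u.length : Int) + 1 := by
          simp [List.length_append]
        rw [this]
        exact PySem.List.pyRange_one_succ_right (by exact_mod_cast hn1)
      rw [hrange, List.foldl_append]
      -- on indices 1 ≤ i < u.length the body reads only u
      have hcg : (PySem.List.pyRange 1 (u.length) 1).foldl
          (fun (p : Int × Int) i =>
            if PySem.List.pyGetD (u ++ [x]) (i - 1) 0 < PySem.List.pyGetD (u ++ [x]) i 0 then
              (p.1 + 1, max p.2 (p.1 + 1))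
            else (1, p.2)) (1, 1)
          = (PySem.List.pyRange 1 (u.length) 1).foldl
          (fun (p : Int × Int) i =>
            if PySem.List.pyGetD u (i - 1) 0 < PySem.List.pyGetD u i 0 then
              (p.1 + 1, max p.2 (p.1 + 1))
            else (1, p.2)) (1, 1) := by
        refine PySem.List.foldl_congr_mem _ _ _ _ ?_
        intro acc i hi
        obtain ⟨hi1, hi2⟩ := PySem.List.mem_pyRange_one.mp hi
        have e1 : PySem.List.pyGetD (u ++ [x]) (i - 1) 0 = PySem.List.pyGetD u (i - 1) 0 := by
          rw [PySem.List.pyGetD_eq_getElem _ _ (by omega)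
                (by simp only [List.length_append]; push_cast; omega),
              PySem.List.pyGetD_eq_getElem _ _ (by omega) (by push_cast; omega)]
          exact List.getElem_append_left (by omega)
        have e2 : PySem.List.pyGetD (u ++ [x]) i 0 = PySem.List.pyGetD u i 0 := by
          rw [PySem.List.pyGetD_eq_getElem _ _ (by omega)
                (by simp only [List.length_append]; push_cast; omega),
              PySem.List.pyGetD_eq_getElem _ _ (by omega) (by push_cast; omega)]
          exact List.getElem_append_left (by omega)
        rw [e1, e2]
      rw [hcg, ih hu]
      -- the final step at index u.length
      have hw : u.getLast? = some (u.getD (u.length - 1) 0) := getLast?_getD_self hu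
      have htn : ((u.length : Int) - 1).toNat = u.length - 1 := by omega
      have e1 : PySem.List.pyGetD (u ++ [x]) ((u.length : Int) - 1) 0
          = u.getD (u.length - 1) 0 := by
        rw [PySem.List.pyGetD_eq_getElem _ _ (by omega)
              (by simp only [List.length_append]; push_cast; omega)]
        simp only [htn]
        rw [List.getElem_append_left (by omega), List.getD_eq_getElem u 0 (by omega)]
      have e2 : PySem.List.pyGetD (u ++ [x]) ((u.length : Int)) 0 = x := by
        rw [PySem.List.pyGetD_eq_getElem _ _ (by omega)
              (by simp only [List.length_append, List.length_cons, List.length_nil];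
                  push_cast; omega)]
        simp only [Int.toNat_natCast]
        exact List.getElem_concat_length rfl _
      simp only [List.foldl_cons, List.foldl_nil]
      rw [e1, e2, suf_append_singleton u x _ hw, lsp_append_singleton u x,
          suf_append_singleton u x _ hw]
      have hlp := lsp_pos u hu
      by_cases hwx : u.getD (u.length - 1) 0 < x
      · simp only [if_pos hwx, Prod.mk.injEq]
        exact ⟨by push_cast; ring, by push_cast [Nat.cast_max]; omega⟩
      · simp only [if_neg hwx, Prod.mk.injEq]
        exact ⟨by simp, by push_cast [Nat.cast_max]; omega⟩

theorem pyLongestSqeu_eq (l : List Int) : pyLongestSqeu l = (lsp l : Int) := by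
  match l with
  | [] => simp [pyLongestSqeu, lsp, lspA]
  | [a] => simp [pyLongestSqeu, lsp, lspA, prefR]
  | a :: b :: t =>
    have hne : (a :: b :: t : List Int) ≠ [] := by simp
    have hlen : (a :: b :: t).length ≠ 1 := by simp
    unfold pyLongestSqeu
    rw [if_neg hne, if_neg hlen, A_fold _ hne]

theorem portA_eq (l : List Int) (h2 : 2 ≤ l.length) :
    longest_sqeu_after_delete_num l = (maxE l : Int) + 1 := by
  have hne : l ≠ [] := by intro h; subst h; simp at h2
  have hl1 : l.length ≠ 1 := by omega
  unfold longest_sqeu_after_delete_num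
  rw [if_neg hne, if_neg hl1, PySem.List.pyRange_one, List.foldl_map]
  have hrng : ((l.length : Int) - 0).toNat = l.length := by omega
  rw [hrng]
  have hcg : ∀ (m : Int), ∀ k ∈ List.range l.length,
      max m (pyLongestSqeu
        (PySem.List.slice l none (some ((0 : Int) + (k : Int))) ++
          PySem.List.slice l (some (((0 : Int) + (k : Int)) + 1)) none))
      = max m (((lsp (l.eraseIdx k) : Nat) : Int)) := by
    intro m k _
    have h0 : ((0 : Int) + (k : Int)) = ((k : Nat) : Int) := by omega
    have h1 : (((k : Nat) : Int) + 1) = (((k + 1 : Nat)) : Int) := by push_cast; omega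
    rw [h0, h1, PySem.List.slice_to_natCast, PySem.List.slice_from_natCast,
        ← List.eraseIdx_eq_take_drop_succ, pyLongestSqeu_eq]
  rw [PySem.List.foldl_congr_mem _ _ _ _ (fun m k hk => hcg m k hk)]
  have := foldl_max_cast (List.range l.length) (fun k => lsp (l.eraseIdx k)) 0
  simp only [Nat.cast_zero] at this
  rw [this]
  rfl

-- ---------- port B evaluates to XB ----------

theorem endR_take_one (r : Int → Int → Prop) [DecidableRel r] (w : List Int) (h : w ≠ []) :
    endR r (w.take 1) = 1 := by
  match w with
  | a :: t => simp [endR, prefR]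

theorem getLast?_map_range {α : Type} (f : Nat → α) (m : Nat) (h : 1 ≤ m) :
    ((List.range m).map f).getLast? = some (f (m - 1)) := by
  have hlen : ((List.range m).map f).length = m := by simp
  rw [List.getLast?_eq_getElem?, hlen, List.getElem?_map,
      List.getElem?_range (by omega)]
  rfl

theorem scan_fold (r : Int → Int → Prop) [DecidableRel r] (w : List Int) (m : Nat)
    (h1 : 1 ≤ m) (hm : m ≤ w.length) :
    (PySem.List.pyRange 1 (m : Int) 1).foldl
      (fun acc i =>
        acc ++ [if r (PySem.List.pyGetD w (i - 1) 0) (PySem.List.pyGetD w i 0) then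
                  PySem.List.pyGetD acc (-1) 0 + 1 else 1])
      [(1 : Int)]
    = (List.range m).map (fun j => ((endR r (w.take (j + 1)) : Nat) : Int)) := by
  induction m with
  | zero => omega
  | succ m ih =>
    rcases Nat.lt_or_ge 1 (m + 1) with hm1 | hm1
    · -- m ≥ 1
      have hmge : 1 ≤ m := by omega
      have hrange : PySem.List.pyRange 1 ((m + 1 : Nat) : Int) 1
          = PySem.List.pyRange 1 (m : Int) 1 ++ [(m : Int)] := by
        have : ((m + 1 : Nat) : Int) = (m : Int) + 1 := by push_cast; ring
        rw [this]
        exact PySem.List.pyRange_one_succ_right (by exact_mod_cast hmge)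
      rw [hrange, List.foldl_append, ih hmge (by omega)]
      simp only [List.foldl_cons, List.foldl_nil]
      -- the element values at index m
      have htn : ((m : Int) - 1).toNat = m - 1 := by omega
      have e1 : PySem.List.pyGetD w ((m : Int) - 1) 0 = w.getD (m - 1) 0 := by
        rw [PySem.List.pyGetD_eq_getElem _ _ (by omega) (by push_cast; omega)]
        simp only [htn]
        rw [List.getD_eq_getElem w 0 (by omega)]
      have e2 : PySem.List.pyGetD w ((m : Int)) 0 = w.getD m 0 := by
        rw [PySem.List.pyGetD_natCast]
      have hne : (List.range m).map (fun j => ((endR r (w.take (j + 1)) : Nat) : Int)) ≠ [] := by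
        intro h0
        have := congrArg List.length h0
        simp at this
        omega
      have e3 : PySem.List.pyGetD
            ((List.range m).map (fun j => ((endR r (w.take (j + 1)) : Nat) : Int))) (-1) 0
          = ((endR r (w.take m) : Nat) : Int) := by
        rw [PySem.List.pyGetD_neg_one _ _ hne]
        have hgl := getLast?_map_range (fun j => ((endR r (w.take (j + 1)) : Nat) : Int)) m hmge
        rw [List.getLast?_eq_some_getLast hne] at hgl
        have := Option.some.inj hgl
        rw [this]
        show ((endR r (w.take (m - 1 + 1)) : Nat) : Int) = ((endR r (w.take m) : Nat) : Int)
        rw [(by omega : m - 1 + 1 = m)]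
      rw [e1, e2, e3]
      -- the new element is endR of the next prefix
      have htake : w.take (m + 1) = w.take m ++ [w.getD m 0] := by
        rw [List.take_succ]
        congr 1
        rw [List.getElem?_eq_getElem (show m < w.length by omega),
            List.getD_eq_getElem w 0 (show m < w.length by omega)]
        rfl
      have hlast : (w.take m).getLast? = some (w.getD (m - 1) 0) := by
        have h' := getLast?_take_getD (l := w) (k := m - 1) (by omega)
        rw [(by omega : m - 1 + 1 = m)] at h'
        exact h'
      have hstep : endR r (w.take (m + 1))
          = if r (w.getD (m - 1) 0) (w.getD m 0) then endR r (w.take m) + 1 else 1 := by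
        rw [htake]
        exact endR_append_singleton r _ _ _ hlast
      rw [List.range_succ, List.map_append]
      congr 1
      simp only [List.map_cons, List.map_nil]
      congr 1
      rw [hstep]
      by_cases hr : r (w.getD (m - 1) 0) (w.getD m 0)
      · rw [if_pos hr, if_pos hr]; push_cast; ring
      · rw [if_neg hr, if_neg hr]; simp
    · -- m + 1 = 1
      have : m = 0 := by omega
      subst this
      have hrange : PySem.List.pyRange 1 ((1 : Nat) : Int) 1 = [] := by
        rw [PySem.List.pyRange_one]
        simp
      rw [hrange]
      simp only [List.foldl_nil]
      rw [(by norm_num : (0 + 1 : Nat) = 1), List.range_one, List.map_cons, List.map_nil,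
          endR_take_one r w (by intro h0; subst h0; simp at hm)]
      simp

theorem endR_flip_pref (v : List Int) :
    endR (fun a b : Int => b < a) v = pref v.reverse := by
  unfold endR pref
  exact prefR_congr _ _ (fun a b => Iff.rfl) v.reverse

theorem rscan_entry (l : List Int) (j : Nat) :
    endR (fun a b : Int => b < a) (l.reverse.take (j + 1))
      = pref (l.drop (l.length - (j + 1))) := by
  rw [endR_flip_pref, List.take_reverse, List.reverse_reverse]

theorem lsp_take_one (l : List Int) (h : 1 ≤ l.length) :
    lsp (l.take 1) = suf (l.take 1) := by
  cases l with
  | nil => simp at h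
  | cons a t => simp [lsp, suf, endR, lspA, prefR]

theorem take_succ_getD (l : List Int) (m : Nat) (h : m < l.length) :
    l.take (m + 1) = l.take m ++ [l.getD m 0] := by
  rw [List.take_succ]
  congr 1
  rw [List.getElem?_eq_getElem h, List.getD_eq_getElem l 0 h]
  rfl

theorem lsp_take_fold (l : List Int) (m : Nat) (h : m + 1 ≤ l.length) :
    (List.range m).foldl (fun b j => max b (suf (l.take (j + 2)))) (suf (l.take 1))
      = lsp (l.take (m + 1)) := by
  induction m with
  | zero => simp [lsp_take_one l (by omega)]
  | succ m ih =>
    rw [List.range_succ, List.foldl_append, ih (by omega)]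
    simp only [List.foldl_cons, List.foldl_nil]
    rw [(by omega : m + 1 + 1 = m + 2), take_succ_getD l (m + 1) (by omega),
        lsp_append_singleton]
    exact max_comm _ _

theorem max_left_eq (l : List Int) (h2 : 2 ≤ l.length) :
    (PySem.List.max?
        ((List.range l.length).map (fun j => ((suf (l.take (j + 1)) : Nat) : Int)))
        (fun y => y)).getD 0
      = ((lsp l : Nat) : Int) := by
  have hn : l.length = (l.length - 1) + 1 := by omega
  rw [hn, List.range_succ_eq_map, List.map_cons, PySem.List.max?_id_cons,
      Option.getD_some, List.foldl_map, List.foldl_map]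
  have hcg : ∀ (acc : Int), ∀ j ∈ List.range (l.length - 1),
      max acc ((suf (l.take (Nat.succ j + 1)) : Nat) : Int)
        = max acc ((suf (l.take (j + 2)) : Nat) : Int) := by
    intro acc j _
    rw [(by omega : Nat.succ j + 1 = j + 2)]
  rw [PySem.List.foldl_congr_mem _ _ _ _ hcg,
      foldl_max_cast (List.range (l.length - 1)) (fun j => suf (l.take (j + 2)))
        (suf (l.take 1)), lsp_take_fold l (l.length - 1) (by omega),
      (by omega : l.length - 1 + 1 = l.length), List.take_length]

theorem right_entry (l : List Int) (k : Nat) (hk : k + 2 < l.length) :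
    (((List.range l.length).map
        (fun j => ((pref (l.drop (l.length - (j + 1))) : Nat) : Int))).reverse).getD (k + 2) 0
      = ((pref (l.drop (k + 2)) : Nat) : Int) := by
  have hlen : ((List.range l.length).map
      (fun j => ((pref (l.drop (l.length - (j + 1))) : Nat) : Int))).length = l.length := by
    simp
  rw [List.getD_eq_getElem?_getD, List.getElem?_reverse (by rw [hlen]; omega), hlen,
      List.getElem?_map, List.getElem?_range (by omega)]
  simp only [Option.map_some, Option.getD_some]
  rw [(by omega : l.length - (l.length - 1 - (k + 2) + 1) = k + 2)]

theorem portB_eq (l : List Int) (h2 : 2 ≤ l.length) :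
    longest_sqeu_after_delete_num_alt l = (XB l : Int) + 1 := by
  have hne : l ≠ [] := by intro h; subst h; simp at h2
  simp only [longest_sqeu_after_delete_num_alt]
  rw [if_neg (by omega : ¬ ((l.length : Int) = 0)),
      if_neg (by omega : ¬ ((l.length : Int) = 1))]
  have hrev : (PySem.List.slice? l none none (-1)).getD [] = l.reverse := by
    rw [PySem.List.slice?_none_none_neg_one]
    rfl
  have hleft : List.foldl
      (fun acc i =>
        acc ++ [if PySem.List.pyGetD l (i - 1) 0 < PySem.List.pyGetD l i 0 then
                  PySem.List.pyGetD acc (-1) 0 + 1 else 1])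
      [1] (PySem.List.pyRange 1 (l.length : Int))
      = (List.range l.length).map (fun j => ((suf (l.take (j + 1)) : Nat) : Int)) :=
    scan_fold (· < ·) l l.length (by omega) (le_refl _)
  have hrscan : List.foldl
      (fun acc i =>
        acc ++ [if PySem.List.pyGetD ((PySem.List.slice? l none none (-1)).getD []) i 0
                    < PySem.List.pyGetD ((PySem.List.slice? l none none (-1)).getD []) (i - 1) 0 then
                  PySem.List.pyGetD acc (-1) 0 + 1 else 1])
      [1] (PySem.List.pyRange 1 (l.length : Int))
      = (List.range l.length).map
          (fun j => ((pref (l.drop (l.length - (j + 1))) : Nat) : Int)) := by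
    rw [hrev]
    have hbase : List.foldl
        (fun acc i =>
          acc ++ [if PySem.List.pyGetD l.reverse i 0 < PySem.List.pyGetD l.reverse (i - 1) 0 then
                    PySem.List.pyGetD acc (-1) 0 + 1 else 1])
        [1] (PySem.List.pyRange 1 (l.reverse.length : Int))
        = (List.range l.reverse.length).map
            (fun j => ((endR (fun a b : Int => b < a) (l.reverse.take (j + 1)) : Nat) : Int)) :=
      scan_fold (fun a b : Int => b < a) l.reverse l.reverse.length (by simp; omega) (le_refl _)
    rw [List.length_reverse] at hbase
    rw [hbase]
    refine List.map_congr_left ?_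
    intro j _
    rw [rscan_entry]
  rw [hrscan, hleft, max_left_eq l h2]
  rw [PySem.List.slice?_none_none_neg_one, Option.getD_some]
  have hbest : (if ((lsp l : Nat) : Int) = (l.length : Int) then ((lsp l : Nat) : Int) - 1
      else ((lsp l : Nat) : Int)) = ((avoidN l : Nat) : Int) := by
    have hlsp1 : 1 ≤ lsp l := lsp_pos l hne
    unfold avoidN
    by_cases h : lsp l = l.length
    · rw [if_pos (show ((lsp l : Nat) : Int) = (l.length : Int) by exact_mod_cast h), if_pos h]
      push_cast; omega
    · rw [if_neg (show ¬ ((lsp l : Nat) : Int) = (l.length : Int) by exact_mod_cast h), if_neg h]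
  rw [hbest, PySem.List.pyRange_one 1 ((l.length : Int) - 1),
      (by omega : ((l.length : Int) - 1 - 1).toNat = l.length - 2), List.foldl_map]
  have hcg : ∀ (b : Int), ∀ k ∈ List.range (l.length - 2),
      (if PySem.List.pyGetD l ((1 : Int) + (k : Int) - 1) 0
            < PySem.List.pyGetD l ((1 : Int) + (k : Int) + 1) 0 then
         max b
           (PySem.List.pyGetD
              ((List.range l.length).map (fun j => ((suf (l.take (j + 1)) : Nat) : Int)))
              ((1 : Int) + (k : Int) - 1) 0 +
            PySem.List.pyGetD
              (((List.range l.length).map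
                  (fun j => ((pref (l.drop (l.length - (j + 1))) : Nat) : Int))).reverse)
              ((1 : Int) + (k : Int) + 1) 0)
       else b)
      = (if l.getD k 0 < l.getD (k + 2) 0 then
           max b (((suf (l.take (k + 1)) + pref (l.drop (k + 2)) : Nat) : Int)) else b) := by
    intro b k hk
    have hklt : k < l.length - 2 := List.mem_range.mp hk
    rw [(by push_cast; ring : ((1 : Int) + (k : Int) - 1) = ((k : Nat) : Int)),
        (by push_cast; ring : ((1 : Int) + (k : Int) + 1) = (((k + 2 : Nat)) : Int)),
        PySem.List.pyGetD_natCast, PySem.List.pyGetD_natCast, PySem.List.pyGetD_natCast,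
        PySem.List.pyGetD_natCast]
    have he : ((List.range l.length).map
        (fun j => ((suf (l.take (j + 1)) : Nat) : Int))).getD k 0
        = ((suf (l.take (k + 1)) : Nat) : Int) := by
      rw [List.getD_eq_getElem?_getD, List.getElem?_map, List.getElem?_range (by omega)]
      rfl
    rw [he, right_entry l k (by omega), ← Nat.cast_add]
  rw [PySem.List.foldl_congr_mem _ _ _ _ hcg,
      foldl_maxif_cast (List.range (l.length - 2))
        (fun k => l.getD k 0 < l.getD (k + 2) 0)
        (fun k => suf (l.take (k + 1)) + pref (l.drop (k + 2))) (avoidN l)]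
  rfl

-- ===== VERDICT (by name: the statement is the Claim_ definition above) =====
theorem longest_sqeu_after_delete_num_spec : Claim_equal_longest_sqeu_after_delete_num := by
  intro nums _
  show longest_sqeu_after_delete_num nums = longest_sqeu_after_delete_num_alt nums
  match hn : nums with
  | [] => rfl
  | [a] => rfl
  | a :: b :: t =>
    have h2 : 2 ≤ (a :: b :: t).length := by simp
    rw [portA_eq _ h2, portB_eq _ h2, core_eq _ h2]
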